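-- pv_equiv track=rewrite | github.com/deveamm/IRS-MovieLibrary | preproc_data.py | tagsreviews
-- ===== SOURCE A (Python) =====
-- def tagsreviews(numTags:int) -> list[int]:
--     listTags = []
--
--     for i in range(numTags):
--
--         if i<numTags/2:
--             listTags.append(0)
--         else:
--             listTags.append(1)
--     return listTags
-- ===== SOURCE B (Python) =====
-- def tagsreviews(numTags: int) -> list[int]:
--     # closed form: first ceil(n/2) entries are 0, remaining floor(n/2) are 1
--     return [0] * ((numTags + 1) // 2) + [1] * (numTags // 2)
-- ===== Notes on version B (the rewrite author's own statement) =====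
-- stated objective: simpler
-- what changed: Replaced the per-element loop with a branch by a closed-form construction: [0]*ceil(n/2) + [1]*floor(n/2).
import Mathlib
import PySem

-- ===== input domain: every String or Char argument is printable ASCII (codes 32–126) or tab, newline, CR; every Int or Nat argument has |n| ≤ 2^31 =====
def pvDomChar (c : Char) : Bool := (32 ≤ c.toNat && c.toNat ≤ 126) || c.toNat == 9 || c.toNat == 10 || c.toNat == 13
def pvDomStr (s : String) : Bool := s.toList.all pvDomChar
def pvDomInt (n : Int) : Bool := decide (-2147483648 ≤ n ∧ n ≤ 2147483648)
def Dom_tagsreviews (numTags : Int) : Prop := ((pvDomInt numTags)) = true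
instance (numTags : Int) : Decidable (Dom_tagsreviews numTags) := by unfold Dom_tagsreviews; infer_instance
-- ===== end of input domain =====

-- B replaces A's per-element loop-and-branch by the closed-form list [0]*⌈n/2⌉ ++ [1]*⌊n/2⌋ (simpler).

-- ===== PORT A =====
-- Python's 'i < numTags/2' is float true division; on the domain |numTags| ≤ 2^31 it is exact
-- and equivalent to the integer comparison 2*i < numTags, which is how it is ported.
def tagsreviews (numTags : Int) : List Int :=
  (PySem.List.pyRange 0 numTags 1).foldl
    (fun listTags i => if 2 * i < numTags then listTags ++ [0] else listTags ++ [1]) []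

-- ===== PORT B =====
def tagsreviews_alt (numTags : Int) : List Int :=
  List.replicate (((numTags + 1).fdiv 2).toNat) 0 ++ List.replicate ((numTags.fdiv 2).toNat) 1

-- ===== PRECONDITION & SPEC =====
def Spec_tagsreviews (numTags : Int) (out : List Int) : Prop := out = tagsreviews_alt numTags
instance (numTags : Int) (out : List Int) : Decidable (Spec_tagsreviews numTags out) := by unfold Spec_tagsreviews; infer_instance

-- ===== CLAIM (what is proved, stated in full; the proofs are below) =====
def Claim_equal_tagsreviews : Prop := ∀ (numTags : Int), Dom_tagsreviews numTags → Spec_tagsreviews numTags (tagsreviews numTags)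

-- ===== LEMMAS AND PROOFS =====

-- a 0/1 threshold map over List.range, in closed form
theorem map_ite_range (z : Nat) : ∀ (m : Nat),
    (List.range m).map (fun (i : Nat) => if (i : Int) < (z : Int) then (0 : Int) else 1)
      = List.replicate (min z m) 0 ++ List.replicate (m - z) 1 := by
  intro m
  induction m with
  | zero => simp
  | succ m ih =>
    rw [List.range_succ, List.map_append, ih]
    by_cases h : m < z
    · have h1 : (m : Int) < (z : Int) := by exact_mod_cast h
      have h2 : min z m = m := by omega
      have h3 : min z (m + 1) = m + 1 := by omega
      have h4 : m - z = 0 := by omega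
      have h5 : m + 1 - z = 0 := by omega
      simp [h2, h3, h4, h5, List.replicate_succ']
      omega
    · have h1 : ¬ ((m : Int) < (z : Int)) := by simp; exact_mod_cast Nat.le_of_not_lt h
      have h2 : min z m = z := by omega
      have h3 : min z (m + 1) = z := by omega
      have h4 : m + 1 - z = (m - z) + 1 := by omega
      simp [h2, h3, h4, List.replicate_succ', List.append_assoc]
      omega

theorem tagsreviews_eq (n : Int) : tagsreviews n = tagsreviews_alt n := by
  unfold tagsreviews tagsreviews_alt
  have hbody : (fun (listTags : List Int) (i : Int) =>
      if 2 * i < n then listTags ++ [0] else listTags ++ [1])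
      = fun listTags i => listTags ++ [if 2 * i < n then (0 : Int) else 1] := by
    funext acc i; split <;> rfl
  rw [hbody, PySem.List.foldl_append_singleton_eq_map, List.nil_append,
      PySem.List.pyRange_one, List.map_map]
  have hz : ((n + 1).fdiv 2) = (n + 1) / 2 := by rw [Int.fdiv_eq_ediv]; simp
  have ho : (n.fdiv 2) = n / 2 := by rw [Int.fdiv_eq_ediv]; simp
  rw [hz, ho]
  set z : Nat := ((n + 1) / 2).toNat with hzdef
  have hcong : ∀ k ∈ List.range (n - 0).toNat,
      ((fun i => if 2 * i < n then (0 : Int) else 1) ∘ fun k : Nat => (0 : Int) + ↑k) k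
        = (fun i : Nat => if (i : Int) < (z : Int) then (0 : Int) else 1) k := by
    intro k hk
    simp only [List.mem_range] at hk
    simp only [Function.comp, zero_add]
    by_cases h : 2 * (k : Int) < n
    · rw [if_pos h, if_pos (by omega)]
    · rw [if_neg h, if_neg (by omega)]
  rw [List.map_congr_left hcong, map_ite_range]
  have h1 : min z (n - 0).toNat = z := by omega
  have h2 : (n - 0).toNat - z = (n / 2).toNat := by omega
  rw [h1, h2]

-- ===== VERDICT (by name: the statement is the Claim_ definition above) =====
theorem tagsreviews_spec : Claim_equal_tagsreviews := by
  intro n _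
  exact tagsreviews_eq n
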